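-- pv_equiv track=rewrite | github.com/Sid-pawar-13/HackerRank-ProblemSolving | ManasaandStones.py | stones
-- ===== SOURCE A (Python) =====
-- def stones(n, a, b):
--     if a!=b:
--         l=[0]*n
--         left = 1
--         right = n-2
--         while left <= right:
--             l[left] = right * a + left *b
--             l[right] = left * a + right *b
--             left+=1
--             right-=1
--         l[0] = a*(n-1)
--         l[n-1] = b*(n-1)
--         return sorted(l)
--     return [a*(n-1)]
-- ===== SOURCE B (Python) =====
-- def stones(n, a, b):
--     # Final value after i steps of b and (n-1-i) steps of a is a*(n-1) + i*(b-a):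
--     # linear in i, so the distinct values, in sorted order, are emitted directly.
--     if a == b:
--         return [a * (n - 1)]
--     base = min(a, b) * (n - 1)
--     step = abs(a - b)
--     return [base + i * step for i in range(n)]
-- ===== Notes on version B (the rewrite author's own statement) =====
-- stated objective: faster
-- what changed: B replaces A's two-pointer array fill followed by sorted() with a closed-form arithmetic progression min(a,b)*(n-1) + i*|a-b| emitted directly in sorted order, no array mutation and no sort.
import Mathlib
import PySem

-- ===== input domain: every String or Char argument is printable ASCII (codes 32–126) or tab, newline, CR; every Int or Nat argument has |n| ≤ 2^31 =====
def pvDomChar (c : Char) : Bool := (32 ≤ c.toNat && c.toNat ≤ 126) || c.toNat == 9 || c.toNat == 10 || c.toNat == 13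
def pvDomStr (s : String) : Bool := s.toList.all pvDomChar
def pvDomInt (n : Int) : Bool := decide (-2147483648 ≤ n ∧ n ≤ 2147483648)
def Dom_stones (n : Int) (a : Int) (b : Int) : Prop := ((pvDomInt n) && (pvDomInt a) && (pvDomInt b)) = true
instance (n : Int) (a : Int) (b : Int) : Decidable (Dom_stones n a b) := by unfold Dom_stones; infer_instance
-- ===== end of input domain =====

-- B replaces A's two-pointer fill + sorted() by emitting the arithmetic progression
-- min(a,b)*(n-1) + i*|a-b| directly in sorted order (no sort).

-- ===== PORT A =====
-- the while loop: l[left] = right*a + left*b; l[right] = left*a + right*b; left += 1; right -= 1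
def stonesLoop (a : Int) (b : Int) (left : Int) (right : Int) (l : List Int) : List Int :=
  if left ≤ right then
    stonesLoop a b (left + 1) (right - 1)
      ((l.set left.toNat (right * a + left * b)).set right.toNat (left * a + right * b))
  else l
termination_by (right + 1 - left).toNat
decreasing_by omega

def stones (n : Int) (a : Int) (b : Int) : List Int :=
  if a ≠ b then
    -- l = [0]*n; while loop; l[0] = a*(n-1); l[n-1] = b*(n-1); return sorted(l)
    PySem.List.sorted
      (((stonesLoop a b 1 (n - 2) (List.replicate n.toNat 0)).set 0 (a * (n - 1))).set
        (n - 1).toNat (b * (n - 1)))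
      (fun x => x) false
  else [a * (n - 1)]

-- ===== PORT B =====
def stones_alt (n : Int) (a : Int) (b : Int) : List Int :=
  if a = b then [a * (n - 1)]
  else -- base = min(a,b)*(n-1); step = abs(a-b); [base + i*step for i in range(n)]
    (PySem.List.pyRange 0 n 1).map (fun i => min a b * (n - 1) + i * |a - b|)

-- ===== PRECONDITION & SPEC =====
-- Pre_ excludes exactly the inputs where A raises IndexError: a ≠ b with n ≤ 0 ([0]*n is empty).
def Pre_stones (n : Int) (a : Int) (b : Int) : Prop := a = b ∨ 1 ≤ n
instance (n : Int) (a : Int) (b : Int) : Decidable (Pre_stones n a b) := by unfold Pre_stones; infer_instance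
def pvWitness_stones : Int × Int × Int := (5, 2, 7)

def Spec_stones (n : Int) (a : Int) (b : Int) (out : List Int) : Prop := out = stones_alt n a b
instance (n : Int) (a : Int) (b : Int) (out : List Int) : Decidable (Spec_stones n a b out) := by unfold Spec_stones; infer_instance

-- ===== CLAIM (what is proved, stated in full; the proofs are below) =====
def Claim_equal_stones : Prop := ∀ (n : Int) (a : Int) (b : Int), Dom_stones n a b → Pre_stones n a b → Spec_stones n a b (stones n a b)

-- ===== LEMMAS AND PROOFS =====

-- a list is the map of its getD over its index range
lemma map_getD_range (l : List Int) :
    (List.range l.length).map (fun i => l.getD i 0) = l := by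
  apply List.ext_getElem
  · simp
  · intro i h1 h2
    simp [List.getD_eq_getElem?_getD, List.getElem?_eq_getElem h2]

-- what the while loop computes: positions in [left,right] hold (left+right-i)*a + i*b, others untouched
lemma stonesLoop_eq (a b : Int) : ∀ (fuel : Nat) (left right : Int) (l : List Int),
    (right + 1 - left).toNat ≤ fuel → 1 ≤ left →
    stonesLoop a b left right l =
      (List.range l.length).map (fun (i : Nat) =>
        if left ≤ (i : Int) ∧ (i : Int) ≤ right then (left + right - (i : Int)) * a + (i : Int) * b
        else l.getD i 0) := by
  intro fuel
  induction fuel with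
  | zero =>
    intro left right l hf hl
    rw [stonesLoop, if_neg (by omega)]
    conv_lhs => rw [← map_getD_range l]
    apply List.map_congr_left
    intro i hi
    rw [if_neg (by omega)]
  | succ m ih =>
    intro left right l hf hl
    rw [stonesLoop]
    by_cases hlr : left ≤ right
    · rw [if_pos hlr]
      set l' := (l.set left.toNat (right * a + left * b)).set right.toNat (left * a + right * b) with hl'
      have hlen : l'.length = l.length := by simp [hl']
      rw [ih (left + 1) (right - 1) l' (by omega) (by omega), hlen]
      apply List.map_congr_left
      intro i hi
      rw [List.mem_range] at hi
      have h0l : (0 : Int) ≤ left := by omega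
      by_cases h1 : left + 1 ≤ (i : Int) ∧ (i : Int) ≤ right - 1
      · rw [if_pos h1, if_pos (by omega)]
        ring
      · rw [if_neg h1]
        by_cases h2 : (i : Int) = left ∨ (i : Int) = right
        · rw [if_pos (by omega)]
          have hl'len : i < l'.length := by omega
          rw [List.getD_eq_getElem l' 0 hl'len]
          simp only [hl', List.getElem_set]
          rcases h2 with h2 | h2
          · by_cases heq : left = right
            · rw [if_pos (by omega), h2, ← heq]   -- i = left = right: second write wins, same value
              ring
            · rw [if_neg (by omega), if_pos (by omega), h2]
              ring
          · rw [if_pos (by omega), h2]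
            ring
        · rw [if_neg (by omega)]
          have hir : right.toNat ≠ i := by omega
          have hil : left.toNat ≠ i := by omega
          simp [hl', List.getD_eq_getElem?_getD, List.getElem?_set_ne hir, List.getElem?_set_ne hil]
    · rw [if_neg hlr]
      conv_lhs => rw [← map_getD_range l]
      apply List.map_congr_left
      intro i hi
      rw [if_neg (by omega)]

-- the fully built array before sorting is the map of f i = (n-1-i)*a + i*b over the indices
lemma stones_array (n a b : Int) (hn : 1 ≤ n) :
    ((stonesLoop a b 1 (n - 2) (List.replicate n.toNat 0)).set 0 (a * (n - 1))).set
        (n - 1).toNat (b * (n - 1)) =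
      (List.range n.toNat).map (fun (i : Nat) => (n - 1 - (i : Int)) * a + (i : Int) * b) := by
  rw [stonesLoop_eq a b (n - 2 + 1 - 1).toNat 1 (n - 2) _ le_rfl (by omega)]
  apply List.ext_getElem
  · simp
  · intro i h1 h2
    have hlen : i < n.toNat := by simpa using h2
    rw [List.getElem_set, List.getElem_set]
    simp only [List.getElem_map, List.getElem_range]
    by_cases hlast : (n - 1).toNat = i
    · rw [if_pos hlast]
      have hi' : (i : Int) = n - 1 := by omega
      rw [hi']; ring
    · rw [if_neg hlast]
      by_cases h00 : (0 : Nat) = i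
      · rw [if_pos h00]
        have hi' : (i : Int) = 0 := by omega
        rw [hi']; ring
      · rw [if_neg h00, if_pos (by constructor <;> omega)]
        ring

-- B's list is strictly increasing
lemma alt_pairwise (n a b : Int) (hab : a ≠ b) :
    ((PySem.List.pyRange 0 n 1).map (fun i => min a b * (n - 1) + i * |a - b|)).Pairwise (· < ·) := by
  rw [List.pairwise_map]
  refine List.Pairwise.imp ?_ (PySem.List.pairwise_lt_pyRange_one 0 n)
  intro x y hxy
  have hstep : 0 < |a - b| := abs_pos.mpr (sub_ne_zero.mpr hab)
  have := mul_lt_mul_of_pos_right hxy hstep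
  linarith

-- B's list is a permutation of the pre-sort array
lemma alt_perm (n a b : Int) (hn : 1 ≤ n) (hab : a ≠ b) :
    ((PySem.List.pyRange 0 n 1).map (fun i => min a b * (n - 1) + i * |a - b|)).Perm
      ((List.range n.toNat).map (fun (i : Nat) => (n - 1 - (i : Int)) * a + (i : Int) * b)) := by
  have hrange : (PySem.List.pyRange 0 n 1).map (fun i => min a b * (n - 1) + i * |a - b|)
      = (List.range n.toNat).map (fun (k : Nat) => min a b * (n - 1) + (k : Int) * |a - b|) := by
    rw [PySem.List.pyRange_one, List.map_map]
    simp [Function.comp_def]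
  rw [hrange]
  rcases lt_or_gt_of_ne hab with hlt | hgt
  · -- a < b : the two maps are equal pointwise
    have : (List.range n.toNat).map (fun (k : Nat) => min a b * (n - 1) + (k : Int) * |a - b|)
        = (List.range n.toNat).map (fun (i : Nat) => (n - 1 - (i : Int)) * a + (i : Int) * b) := by
      apply List.map_congr_left
      intro k _
      rw [min_eq_left hlt.le, abs_of_nonpos (by omega)]
      ring
    rw [this]
  · -- b < a : B's list is the reverse of the array
    have : (List.range n.toNat).map (fun (k : Nat) => min a b * (n - 1) + (k : Int) * |a - b|)
        = ((List.range n.toNat).map (fun (i : Nat) => (n - 1 - (i : Int)) * a + (i : Int) * b)).reverse := by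
      apply List.ext_getElem
      · simp
      · intro k h1 h2
        simp only [List.length_map, List.length_range] at h1
        rw [List.getElem_reverse]
        simp only [List.getElem_map, List.getElem_range, List.length_map, List.length_range]
        rw [min_eq_right hgt.le, abs_of_nonneg (by omega)]
        have hcast : ((n.toNat - 1 - k : Nat) : Int) = n - 1 - (k : Int) := by omega
        rw [hcast]
        ring
    rw [this]
    exact List.reverse_perm _

-- ===== VERDICT (by name: the statement is the Claim_ definition above) =====
theorem stones_spec : Claim_equal_stones := by
  intro n a b _ hpre
  unfold Spec_stones stones stones_alt
  by_cases hab : a = b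
  · simp [hab]
  · have hn : 1 ≤ n := by rcases hpre with h | h; exact absurd h hab; exact h
    rw [if_pos hab, if_neg hab, stones_array n a b hn]
    exact PySem.List.sorted_eq_of_perm_of_pairwise_lt _ _ _
      (alt_perm n a b hn hab) (alt_pairwise n a b hab)
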